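-- pv_equiv track=rewrite | github.com/leanprover-community/mathlib4 | scripts/dag_traversal.py | _compute_depths
-- ===== SOURCE A (Python) =====
-- def _compute_depths(
--     successors_of: dict[str, list[str]],
--     weights: dict[str, int] | None = None,
-- ) -> dict[str, int]:
--     """Compute the longest successor-chain length for each module.
--
--     Without *weights*:
--         depth[m] = 0 if m has no successors, else
--         1 + max(depth[s] for s in successors_of[m]).
--
--     With *weights*:
--         w(m) = weights.get(m, 0)
--         depth[m] = w(m) if m has no successors, else
--         w(m) + max(depth[s] for s in successors_of[m]).
--
--         Modules absent from *weights* (e.g. skip-set modules that are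
--         processed instantly) default to weight 0, so they don't inflate
--         the critical-path estimate.
--
--     Used to prioritise modules whose completion unblocks the costliest
--     chains of future work, improving overall parallelism.
--
--     Nodes involved in cycles (which shouldn't exist in a well-formed
--     import graph) are assigned depth 0.
--     """
--     depths: dict[str, int] = {}
--     visiting: set[str] = set()  # cycle detection
--
--     for start in successors_of:
--         if start in depths:
--             continue
--         # Iterative post-order DFS
--         stack: list[tuple[str, bool]] = [(start, False)]
--         while stack:
--             node, processed = stack.pop()
--             if processed:
--                 visiting.discard(node)
--                 succs = [s for s in successors_of.get(node, []) if s in depths]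
--                 if weights is not None:
--                     w = weights.get(node, 0)
--                     depths[node] = (w + max(depths[s] for s in succs)) if succs else w
--                 else:
--                     depths[node] = (1 + max(depths[s] for s in succs)) if succs else 0
--                 continue
--             if node in depths:
--                 continue
--             if node in visiting:
--                 # Cycle — assign depth 0 and don't recurse further.
--                 depths[node] = 0
--                 continue
--             visiting.add(node)
--             stack.append((node, True))
--             for s in successors_of.get(node, []):
--                 if s not in depths and s in successors_of:
--                     stack.append((s, False))
--
--     return depths
-- ===== SOURCE B (Python) =====
-- def _compute_depths(
--     successors_of: dict[str, list[str]],
--     weights: dict[str, int] | None = None,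
-- ) -> dict[str, int]:
--     """Recursive memoized DFS computing the longest successor-chain depth.
--
--     Successors are recursed in reversed list order (matching the pop order
--     of a stack-based traversal), so the result dict's insertion order and
--     the values on cyclic graphs are identical to the iterative version.
--     """
--     depths: dict[str, int] = {}
--     visiting: set[str] = set()  # cycle detection
--
--     def dfs(node: str) -> None:
--         if node not in successors_of:
--             return
--         if node in depths:
--             return
--         if node in visiting:
--             depths[node] = 0  # cycle
--             return
--         visiting.add(node)
--         for s in reversed(successors_of[node]):
--             dfs(s)
--         visiting.discard(node)
--         succs = [s for s in successors_of[node] if s in depths]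
--         if weights is not None:
--             w = weights.get(node, 0)
--             depths[node] = (w + max(depths[s] for s in succs)) if succs else w
--         else:
--             depths[node] = (1 + max(depths[s] for s in succs)) if succs else 0
--
--     for start in successors_of:
--         dfs(start)
--     return depths
-- ===== Notes on version B (the rewrite author's own statement) =====
-- stated objective: simpler
-- what changed: A's iterative post-order DFS with an explicit stack of (node, processed) flags and a resume protocol is replaced by a recursive memoized DFS (inner dfs with a memo dict and a visiting set), recursing over successors in stack-pop order so the result dict, including insertion order and cycle-overwrite values, is identical.
import Mathlib
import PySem

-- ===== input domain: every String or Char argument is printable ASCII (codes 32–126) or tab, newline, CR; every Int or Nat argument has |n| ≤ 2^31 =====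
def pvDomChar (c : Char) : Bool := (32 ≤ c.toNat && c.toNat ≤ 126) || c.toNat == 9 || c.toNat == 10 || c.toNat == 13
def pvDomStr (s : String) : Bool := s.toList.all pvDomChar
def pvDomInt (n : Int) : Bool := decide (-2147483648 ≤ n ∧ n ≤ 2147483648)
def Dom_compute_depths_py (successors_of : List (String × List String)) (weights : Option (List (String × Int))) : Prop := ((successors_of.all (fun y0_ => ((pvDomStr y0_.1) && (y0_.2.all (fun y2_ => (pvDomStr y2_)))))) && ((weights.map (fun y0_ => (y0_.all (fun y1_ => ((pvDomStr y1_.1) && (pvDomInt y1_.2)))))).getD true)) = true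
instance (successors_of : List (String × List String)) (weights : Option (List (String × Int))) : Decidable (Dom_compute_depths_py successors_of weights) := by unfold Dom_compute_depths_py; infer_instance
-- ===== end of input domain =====

-- B replaces A's explicit (node, processed)-flag stack machine by a recursive memoized DFS;
-- same return value (including dict insertion order and cycle behaviour); objective: simpler decomposition.

-- ===== PORT A =====
def pvMax (v : Int) (vs : List Int) : Int := vs.foldl max v
def pvFinish (W : Option (PySem.Dict String Int)) (depths : PySem.Dict String Int)
    (node : String) (succlist : List String) : PySem.Dict String Int :=
  let succs := succlist.filter (fun s => depths.contains s)
  match W with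
  | some w =>
      let wn := w.getD node 0
      depths.insert node (match succs.map (fun s => depths.getD s 0) with
        | [] => wn
        | v :: vs => wn + pvMax v vs)
  | none =>
      depths.insert node (match succs.map (fun s => depths.getD s 0) with
        | [] => 0
        | v :: vs => 1 + pvMax v vs)

def pvRem (S : PySem.Dict String (List String)) (depths : PySem.Dict String Int)
    (visiting : PySem.Set String) : Nat :=
  ((PySem.List.dedup S.keys).filter
    (fun k => !(depths.contains k) && !(PySem.Set.contains visiting k))).length
def pvWt (stack : List (String × Bool)) : Nat :=
  (stack.map (fun e => if e.2 then 1 else 2)).sum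

theorem pv_countP_lt {α : Type} (l : List α) (p q : α → Bool)
    (h : ∀ x ∈ l, p x = true → q x = true) (x : α) (hx : x ∈ l) (hq : q x = true)
    (hp : p x = false) : l.countP p < l.countP q := by
  induction l with
  | nil => cases hx
  | cons a l ih =>
    rcases List.mem_cons.1 hx with rfl | hx'
    · have h1 : l.countP p ≤ l.countP q :=
        List.countP_mono_left (fun y hy => h y (List.mem_cons_of_mem _ hy))
      simp [hp, hq]; omega
    · have h1 := ih (fun y hy => h y (List.mem_cons_of_mem _ hy)) hx'
      by_cases ha : p a = true
      · simp [ha, h a (List.mem_cons_self) ha]; omega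
      · simp only [Bool.not_eq_true] at ha
        simp [List.countP_cons, ha]; omega

theorem pvRem_mono (S : PySem.Dict String (List String))
    {d d' : PySem.Dict String Int} {v v' : PySem.Set String}
    (h : ∀ k, d.contains k = true → d'.contains k = true)
    (h2 : ∀ k, PySem.Set.contains v k = true → (d'.contains k || PySem.Set.contains v' k) = true) :
    pvRem S d' v' ≤ pvRem S d v := by
  unfold pvRem
  simp only [← List.countP_eq_length_filter]
  apply List.countP_mono_left
  intro k _ hk
  simp only [Bool.and_eq_true, Bool.not_eq_true'] at hk ⊢
  refine ⟨?_, ?_⟩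
  · by_contra hc
    simp only [Bool.not_eq_false] at hc
    exact absurd (h k hc) (by simp [hk.1])
  · by_contra hc
    simp only [Bool.not_eq_false] at hc
    have := h2 k hc
    rw [hk.1, hk.2] at this
    simp at this

theorem pvRem_lt (S : PySem.Dict String (List String))
    {d d' : PySem.Dict String Int} {v v' : PySem.Set String}
    (h : ∀ k, d.contains k = true → d'.contains k = true)
    (h2 : ∀ k, PySem.Set.contains v k = true → (d'.contains k || PySem.Set.contains v' k) = true)
    (x : String) (hin : x ∈ PySem.List.dedup S.keys)
    (hbefore : (!(d.contains x) && !(PySem.Set.contains v x)) = true)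
    (hafter : (!(d'.contains x) && !(PySem.Set.contains v' x)) = false) :
    pvRem S d' v' < pvRem S d v := by
  unfold pvRem
  simp only [← List.countP_eq_length_filter]
  refine pv_countP_lt _ _ _ ?_ x hin hbefore hafter
  intro k _ hk
  simp only [Bool.and_eq_true, Bool.not_eq_true'] at hk ⊢
  refine ⟨?_, ?_⟩
  · by_contra hc
    simp only [Bool.not_eq_false] at hc
    exact absurd (h k hc) (by simp [hk.1])
  · by_contra hc
    simp only [Bool.not_eq_false] at hc
    have := h2 k hc
    rw [hk.1, hk.2] at this
    simp at this


theorem pvWt_cons (n : String) (b : Bool) (rest : List (String × Bool)) :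
    pvWt ((n, b) :: rest) = (if b then 1 else 2) + pvWt rest := by
  simp [pvWt]

theorem pv_contains_pvFinish (W : Option (PySem.Dict String Int)) (d : PySem.Dict String Int)
    (node : String) (l : List String) (k : String) :
    (pvFinish W d node l).contains k = (k == node || d.contains k) := by
  unfold pvFinish
  cases W <;> simp [PySem.Dict.contains_insert]

theorem pv_set_contains_add (v : PySem.Set String) (x k : String) :
    PySem.Set.contains (PySem.Set.add v x) k = (PySem.Set.contains v k || k == x) := by
  simp only [PySem.Set.add_eq_ite]
  by_cases h : x ∈ v <;> by_cases h2 : k ∈ v <;> by_cases h3 : k = x <;> simp [h, h2, h3]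

theorem pv_set_contains_discard (v : PySem.Set String) (x k : String) :
    PySem.Set.contains (PySem.Set.discard v x) k = (PySem.Set.contains v k && !(k == x)) := by
  by_cases h2 : k ∈ v <;> by_cases h3 : k = x <;>
    simp [PySem.Set.mem_discard, h2, h3]

def loopA (S : PySem.Dict String (List String)) (W : Option (PySem.Dict String Int)) :
    PySem.Dict String Int → PySem.Set String → List (String × Bool) →
    PySem.Dict String Int × PySem.Set String
  | depths, visiting, [] => (depths, visiting)
  | depths, visiting, (node, processed) :: rest =>
    if processed then
      loopA S W (pvFinish W depths node (S.getD node [])) (PySem.Set.discard visiting node) rest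
    else if depths.contains node then
      loopA S W depths visiting rest
    else if PySem.Set.contains visiting node then
      loopA S W (depths.insert node 0) visiting rest
    else
      loopA S W depths (PySem.Set.add visiting node)
        ((((S.getD node []).filter (fun s => !(depths.contains s) && S.contains s)).reverse.map
            (fun s => (s, false))) ++ (node, true) :: rest)
  termination_by depths visiting stack => (pvRem S depths visiting, pvWt stack)
  decreasing_by
  · -- processed pop
    have hle : pvRem S (pvFinish W depths node (S.getD node [])) (PySem.Set.discard visiting node)
        ≤ pvRem S depths visiting := by
      apply pvRem_mono
      · intro k hk
        rw [pv_contains_pvFinish]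
        simp [hk]
      · intro k hk
        rw [pv_contains_pvFinish, pv_set_contains_discard]
        by_cases hkn : k = node
        · simp [hkn]
        · simp [hkn]
          exact Or.inr ((PySem.Set.contains_iff _ _).1 hk)
    rename_i hproc
    rcases lt_or_eq_of_le hle with hlt | heq
    · exact Prod.Lex.left _ _ hlt
    · rw [heq]
      exact Prod.Lex.right _ (by rw [pvWt_cons]; split <;> omega)
  · -- node already in depths
    rename_i hproc _hdep
    refine Prod.Lex.right _ ?_
    rw [pvWt_cons]
    split <;> omega
  · -- cycle: depths[node] = 0
    have hle : pvRem S (depths.insert node 0) visiting ≤ pvRem S depths visiting := by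
      apply pvRem_mono
      · intro k hk
        rw [PySem.Dict.contains_insert]
        simp [hk]
      · intro k hk
        rw [Bool.or_eq_true]
        exact Or.inr hk
    rcases lt_or_eq_of_le hle with hlt | heq
    · exact Prod.Lex.left _ _ hlt
    · rw [heq]
      refine Prod.Lex.right _ ?_
      rw [pvWt_cons]
      split <;> omega
  · -- push branch
    rename_i hproc hdep hvis
    by_cases hS : S.contains node = true
    · apply Prod.Lex.left
      apply pvRem_lt (x := node)
      · intro k hk; exact hk
      · intro k hk
        rw [pv_set_contains_add, Bool.or_eq_true, Bool.or_eq_true]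
        exact Or.inr (Or.inl hk)
      · rw [PySem.List.mem_dedup]
        exact (PySem.Dict.contains_iff_mem_keys _ _).1 hS
      · simp at hdep hvis
        simp [hdep, hvis]
      · rw [pv_set_contains_add]
        simp
    · have hget : S.getD node [] = [] := PySem.Dict.getD_of_not_contains _ _ (by simpa using hS)
      have hle : pvRem S depths (PySem.Set.add visiting node) ≤ pvRem S depths visiting := by
        apply pvRem_mono
        · intro k hk; exact hk
        · intro k hk
          rw [pv_set_contains_add, Bool.or_eq_true, Bool.or_eq_true]
          exact Or.inr (Or.inl hk)
      rcases lt_or_eq_of_le hle with hlt | heq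
      · exact Prod.Lex.left _ _ hlt
      · rw [heq]
        refine Prod.Lex.right _ ?_
        rw [hget]
        simp only [List.filter_nil, List.reverse_nil, List.map_nil, List.nil_append, pvWt_cons]
        simp_all

def compute_depths_py (successors_of : List (String × List String)) (weights : Option (List (String × Int))) : List (String × Int) :=
  let S : PySem.Dict String (List String) := PySem.Dict.mk successors_of
  let W : Option (PySem.Dict String Int) := weights.map (fun w => PySem.Dict.mk w)
  (S.keys.foldl
    (fun (st : PySem.Dict String Int × PySem.Set String) start =>
      if st.1.contains start then st
      else loopA S W st.1 st.2 [(start, false)])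
    (PySem.Dict.empty, PySem.Set.empty)).1.items

-- ===== PORT B =====
def pvRemV (S : PySem.Dict String (List String)) (visiting : PySem.Set String) : Nat :=
  ((PySem.List.dedup S.keys).filter (fun k => !(PySem.Set.contains visiting k))).length

theorem pvRemV_lt (S : PySem.Dict String (List String)) (visiting : PySem.Set String)
    (node : String) (hS : S.contains node = true) (hv : PySem.Set.contains visiting node = false) :
    pvRemV S (PySem.Set.add visiting node) < pvRemV S visiting := by
  unfold pvRemV
  simp only [← List.countP_eq_length_filter]
  refine pv_countP_lt _ _ _ ?_ node ?_ (by simpa using hv) (by rw [pv_set_contains_add]; simp)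
  · intro k _ hk
    simp only [Bool.not_eq_true'] at hk ⊢
    rw [pv_set_contains_add] at hk
    simp only [Bool.or_eq_false_iff] at hk
    exact hk.1
  · rw [PySem.List.mem_dedup]
    exact (PySem.Dict.contains_iff_mem_keys _ _).1 hS

mutual
def dfsB (S : PySem.Dict String (List String)) (W : Option (PySem.Dict String Int))
    (visiting : PySem.Set String) (depths : PySem.Dict String Int) (node : String) :
    PySem.Dict String Int :=
  if !(S.contains node) then depths
  else if depths.contains node then depths
  else if PySem.Set.contains visiting node then depths.insert node 0
  else
    let depths1 := dfsListB S W (PySem.Set.add visiting node) depths (S.getD node []).reverse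
    pvFinish W depths1 node (S.getD node [])
  termination_by (pvRemV S visiting, 0)
  decreasing_by
    rename_i h1 _h2 h3
    refine Prod.Lex.left _ _ (pvRemV_lt S visiting node ?_ ?_)
    · simpa using h1
    · simpa using h3

def dfsListB (S : PySem.Dict String (List String)) (W : Option (PySem.Dict String Int))
    (visiting : PySem.Set String) (depths : PySem.Dict String Int) :
    List String → PySem.Dict String Int
  | [] => depths
  | s :: r => dfsListB S W visiting (dfsB S W visiting depths s) r
  termination_by l => (pvRemV S visiting, l.length + 1)
  decreasing_by
  · exact Prod.Lex.right _ (by simp only [List.length_cons]; omega)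
  · exact Prod.Lex.right _ (by simp only [List.length_cons]; omega)
end

def compute_depths_py_alt (successors_of : List (String × List String)) (weights : Option (List (String × Int))) : List (String × Int) :=
  let S : PySem.Dict String (List String) := PySem.Dict.mk successors_of
  let W : Option (PySem.Dict String Int) := weights.map (fun w => PySem.Dict.mk w)
  (S.keys.foldl (fun depths start => dfsB S W PySem.Set.empty depths start) PySem.Dict.empty).items

-- ===== PRECONDITION & SPEC =====
def Spec_compute_depths_py (successors_of : List (String × List String)) (weights : Option (List (String × Int))) (out : List (String × Int)) : Prop := out = compute_depths_py_alt successors_of weights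
instance (successors_of : List (String × List String)) (weights : Option (List (String × Int))) (out : List (String × Int)) : Decidable (Spec_compute_depths_py successors_of weights out) := by unfold Spec_compute_depths_py; infer_instance

-- ===== CLAIM (what is proved, stated in full; the proofs are below) =====
def Claim_equal_compute_depths_py : Prop := ∀ (successors_of : List (String × List String)) (weights : Option (List (String × Int))), Dom_compute_depths_py successors_of weights → Spec_compute_depths_py successors_of weights (compute_depths_py successors_of weights)

-- ===== LEMMAS AND PROOFS =====

theorem dfs_mono (S : PySem.Dict String (List String)) (W : Option (PySem.Dict String Int))
    (k : String) :
    ∀ (visiting : PySem.Set String) (depths : PySem.Dict String Int) (node : String),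
       depths.contains k = true → (dfsB S W visiting depths node).contains k = true := by
  have H : ∀ (visiting : PySem.Set String) (depths : PySem.Dict String Int) (node : String),
      (depths.contains k = true → (dfsB S W visiting depths node).contains k = true) := by
    intro visiting depths node
    induction visiting, depths, node using dfsB.induct S W
      (motive2 := fun visiting depths l => depths.contains k = true →
        (dfsListB S W visiting depths l).contains k = true) with
    | case1 v d n h1 => intro hk; rw [dfsB]; simp only [h1, if_pos]; exact hk
    | case2 v d n h1 h2 => intro hk; rw [dfsB]; simp only [if_neg h1, if_pos h2]; exact hk
    | case3 v d n h1 h2 h3 =>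
        intro hk; rw [dfsB]; simp only [if_neg h1, if_neg h2, if_pos h3]
        rw [PySem.Dict.contains_insert]; simp [hk]
    | case4 v d n h1 h2 h3 ih =>
        intro hk; rw [dfsB]; simp only [if_neg h1, if_neg h2, if_neg h3]
        rw [pv_contains_pvFinish]
        simp only [Bool.or_eq_true]
        exact Or.inr (ih hk)
    | case5 v d => rename_i hk; rw [dfsListB]; exact hk
    | case6 v d s r ih1 ih2 => rename_i hk; rw [dfsListB]; exact ih2 (ih1 hk)
  exact H

theorem pv_discard_add (v : PySem.Set String) (node : String) (h : node ∉ v) :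
    PySem.Set.discard (PySem.Set.add v node) node = v := by
  rw [PySem.Set.add_of_not_mem h]
  simp only [PySem.Set.discard, List.filter_append]
  have h2 : List.filter (fun y => !y == node) [node] = [] := by simp
  rw [h2, List.append_nil]
  apply List.filter_eq_self.2
  intro a ha
  simp only [Bool.not_eq_eq_eq_not, Bool.not_true, beq_eq_false_iff_ne, ne_eq]
  exact fun he => h (he ▸ ha)

-- dropping successors that are already-seen or non-keys is a no-op for Source B's dfs
theorem dfs_skip (S : PySem.Dict String (List String)) (W : Option (PySem.Dict String Int))
    (v : PySem.Set String) (d0 : PySem.Dict String Int) :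
    ∀ (l : List String) (d : PySem.Dict String Int),
      (∀ k, d0.contains k = true → d.contains k = true) →
      dfsListB S W v d (l.filter (fun s => !(d0.contains s) && S.contains s)) =
        dfsListB S W v d l := by
  intro l
  induction l with
  | nil => intro d _; simp
  | cons s r ih =>
    intro d hd
    by_cases hp : (!(d0.contains s) && S.contains s) = true
    · simp only [List.filter_cons, hp, if_true]
      rw [dfsListB, dfsListB]
      exact ih _ (fun k hk => dfs_mono S W k _ _ _ (hd k hk))
    · have hp' : (!(d0.contains s) && S.contains s) = false := by simpa using hp
      simp only [List.filter_cons, hp', Bool.false_eq_true, if_false]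
      conv_rhs => rw [dfsListB]
      have hskip : dfsB S W v d s = d := by
        simp only [Bool.and_eq_true, Bool.not_eq_true'] at hp
        rw [dfsB]
        by_cases hS : S.contains s = true
        · have hds : d.contains s = true := by
            rcases not_and_or.1 hp with h1 | h1
            · exact hd s (by simpa using h1)
            · exact absurd hS h1
          simp [hS, hds]
        · have hS' : S.contains s = false := by simpa using hS
          simp [hS']
      rw [hskip]
      exact ih _ hd

-- central simulation: popping an unprocessed key node runs Source B's dfs on it
mutual
theorem loopA_dfs (S : PySem.Dict String (List String)) (W : Option (PySem.Dict String Int))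
    (v : PySem.Set String) (d : PySem.Dict String Int) (node : String)
    (hS : S.contains node = true) (rest : List (String × Bool)) :
    loopA S W d v ((node, false) :: rest) = loopA S W (dfsB S W v d node) v rest := by
  rw [loopA]
  simp only [Bool.false_eq_true, if_false]
  by_cases h2 : d.contains node = true
  · rw [dfsB]
    simp [hS, h2]
  · simp only [h2, Bool.false_eq_true, if_false]
    by_cases h3 : PySem.Set.contains v node = true
    · rw [dfsB]
      simp [hS, h2, (PySem.Set.contains_iff v node).1 h3]
    · have hnv : node ∉ v := fun hm => h3 ((PySem.Set.contains_iff _ _).2 hm)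
      simp only [h3, Bool.false_eq_true, if_false]
      rw [loopA_dfsList S W (PySem.Set.add v node) d
            (((S.getD node []).filter (fun s => !(d.contains s) && S.contains s)).reverse)
            (fun s hs => by
              have hf := List.of_mem_filter (List.mem_reverse.1 hs)
              simp only [Bool.and_eq_true] at hf
              exact hf.2)
            ((node, true) :: rest)]
      rw [loopA]
      simp only [if_true]
      rw [pv_discard_add v node hnv]
      rw [← List.filter_reverse]
      rw [dfs_skip S W (PySem.Set.add v node) d _ d (fun k hk => hk)]
      conv_rhs => rw [dfsB]
      simp [hS, h2, hnv]
  termination_by (pvRemV S v, 0)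
  decreasing_by
    refine Prod.Lex.left _ _ (pvRemV_lt S v node hS ?_)
    simpa using h3

theorem loopA_dfsList (S : PySem.Dict String (List String)) (W : Option (PySem.Dict String Int))
    (v : PySem.Set String) (d : PySem.Dict String Int) (l : List String)
    (hl : ∀ s ∈ l, S.contains s = true) (stack : List (String × Bool)) :
    loopA S W d v ((l.map (fun s => (s, false))) ++ stack) =
      loopA S W (dfsListB S W v d l) v stack := by
  match l with
  | [] => rw [dfsListB]; simp
  | s :: r =>
    simp only [List.map_cons, List.cons_append]
    rw [loopA_dfs S W v d s (hl s (List.mem_cons_self)) _]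
    rw [loopA_dfsList S W v (dfsB S W v d s) r (fun x hx => hl x (List.mem_cons_of_mem _ hx)) stack]
    rw [dfsListB]
  termination_by (pvRemV S v, l.length + 1)
  decreasing_by
    all_goals exact Prod.Lex.right _ (by simp only [List.length_cons]; omega)
end


theorem outer_fold (S : PySem.Dict String (List String)) (W : Option (PySem.Dict String Int)) :
    ∀ (ks : List String) (d : PySem.Dict String Int),
      (∀ s ∈ ks, S.contains s = true) →
      (ks.foldl
        (fun (st : PySem.Dict String Int × PySem.Set String) start =>
          if st.1.contains start then st
          else loopA S W st.1 st.2 [(start, false)])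
        (d, PySem.Set.empty)).1 =
      ks.foldl (fun depths start => dfsB S W PySem.Set.empty depths start) d := by
  intro ks
  induction ks with
  | nil => intro d _; rfl
  | cons s r ih =>
    intro d hks
    have hS := hks s (List.mem_cons_self)
    simp only [List.foldl_cons]
    have hstep :
        (if d.contains s then (d, PySem.Set.empty)
         else loopA S W d PySem.Set.empty [(s, false)]) =
        (dfsB S W PySem.Set.empty d s, PySem.Set.empty) := by
      by_cases hd : d.contains s = true
      · rw [if_pos hd, dfsB]
        simp [hS, hd]
      · rw [if_neg (by simpa using hd)]
        rw [loopA_dfs S W PySem.Set.empty d s hS []]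
        rw [loopA]
    rw [hstep]
    exact ih _ (fun x hx => hks x (List.mem_cons_of_mem _ hx))

theorem compute_depths_eq (successors_of : List (String × List String))
    (weights : Option (List (String × Int))) :
    compute_depths_py successors_of weights = compute_depths_py_alt successors_of weights := by
  unfold compute_depths_py compute_depths_py_alt
  simp only []
  rw [outer_fold (PySem.Dict.mk successors_of) (weights.map (fun w => PySem.Dict.mk w))
        (PySem.Dict.mk successors_of).keys PySem.Dict.empty
        (fun s hs => (PySem.Dict.contains_iff_mem_keys _ _).2 hs)]

-- ===== VERDICT (by name: the statement is the Claim_ definition above) =====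
theorem compute_depths_py_spec : Claim_equal_compute_depths_py := by
  intro successors_of weights _
  unfold Spec_compute_depths_py
  exact compute_depths_eq successors_of weights
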